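-- pv_equiv track=rewrite | github.com/ianmiell/themortgagemeter | website/django/themortgagemeter/themortgagemeterapp/views.py | get_ds_diffs
-- ===== SOURCE A (Python) =====
-- def get_ds_diffs(a,b):
-- 	diff_dict = {}
-- 	if len(a) < 1 or len(b) < 1:
-- 		return diff_dict
-- 	for key in a[0].keys():
-- 		new_list = []
-- 		for m in b:
-- 			if m.get(key) not in new_list:
-- 				new_list.append(m.get(key))
-- 		old_list = []
-- 		for m in a:
-- 			if m.get(key) not in old_list:
-- 				old_list.append(m.get(key))
-- 		if old_list != new_list:
-- 			diff_dict.update({key:{'new':new_list[:],'old':old_list[:]}})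
-- 		else:
-- 			diff_dict.update({key:{'shared':[m.get(key)]}})
-- 	return diff_dict
-- ===== SOURCE B (Python) =====
-- def get_ds_diffs(a, b):
--     if len(a) < 1 or len(b) < 1:
--         return {}
--
--     def dedup(vals):
--         # first-occurrence dedup built back-to-front: prepend each value and
--         # filter its later duplicates out, instead of scanning an accumulator
--         out = []
--         for v in reversed(vals):
--             out = [v] + [x for x in out if x != v]
--         return out
--
--     def entry(key):
--         old = dedup([m.get(key) for m in a])
--         new = dedup([m.get(key) for m in b])
--         if old != new:
--             return {'new': new, 'old': old}
--         return {'shared': [a[-1].get(key)]}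
--
--     return {key: entry(key) for key in a[0]}
-- ===== Notes on version B (the rewrite author's own statement) =====
-- stated objective: alternative
-- what changed: A dedups each key's column with a forward accumulator and an O(d) 'not in list' membership scan per element; B extracts each column as a list and dedups it with a back-to-front prepend-and-filter recquence (out = [v] + [x for x in out if x != v] over reversed values), with no membership test, then emits the entries via a dict comprehension.
import Mathlib
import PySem

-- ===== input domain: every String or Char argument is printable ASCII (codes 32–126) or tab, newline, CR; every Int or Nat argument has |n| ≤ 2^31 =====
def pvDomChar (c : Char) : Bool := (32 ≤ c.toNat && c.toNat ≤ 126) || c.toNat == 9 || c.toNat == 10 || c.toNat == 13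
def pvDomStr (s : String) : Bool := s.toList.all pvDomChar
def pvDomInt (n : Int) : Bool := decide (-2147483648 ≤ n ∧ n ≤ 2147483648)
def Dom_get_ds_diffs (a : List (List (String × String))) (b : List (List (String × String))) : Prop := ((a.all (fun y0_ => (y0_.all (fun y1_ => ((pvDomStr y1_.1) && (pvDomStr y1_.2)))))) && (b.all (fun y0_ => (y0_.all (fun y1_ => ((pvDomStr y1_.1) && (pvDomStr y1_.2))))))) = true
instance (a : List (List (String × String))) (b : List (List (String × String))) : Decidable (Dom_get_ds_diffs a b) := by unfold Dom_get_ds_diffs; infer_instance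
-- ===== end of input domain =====

-- B dedups each key's column by a back-to-front prepend-and-filter pass (no membership scan)
-- instead of A's forward accumulator with an inner 'not in list' scan; return values are equal on Pre_.

-- ===== PORT A =====
-- m.get(key): inside Pre_ the key is always present, so the "" default is never the result
def pvGet (m : List (String × String)) (k : String) : String :=
  (PySem.Dict.mk m).getD k ""

def get_ds_diffs (a : List (List (String × String))) (b : List (List (String × String))) :
    List (String × List (String × List String)) :=
  if a.length < 1 ∨ b.length < 1 then []
  else
    ((PySem.Dict.mk (a.headD [])).keys.foldl
      (fun (dd : PySem.Dict String (List (String × List String))) key =>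
        let new_list := b.foldl (fun nl m => if pvGet m key ∈ nl then nl else nl ++ [pvGet m key]) []
        let old_list := a.foldl (fun ol m => if pvGet m key ∈ ol then ol else ol ++ [pvGet m key]) []
        if old_list ≠ new_list then dd.insert key [("new", new_list), ("old", old_list)]
        else dd.insert key [("shared", [pvGet (a.getLast?.getD []) key])])
      PySem.Dict.empty).items

-- ===== PORT B =====
-- Source B's dedup: loop over reversed(vals), out = [v] + [x for x in out if x != v]
def pvDedup (vals : List String) : List String :=
  vals.reverse.foldl (fun out v => v :: out.filter (fun x => x != v)) []

def get_ds_diffs_alt (a : List (List (String × String))) (b : List (List (String × String))) :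
    List (String × List (String × List String)) :=
  if a.length < 1 ∨ b.length < 1 then []
  else
    let entry := fun key =>
      let old := pvDedup (a.map (fun m => pvGet m key))
      let nw := pvDedup (b.map (fun m => pvGet m key))
      if old ≠ nw then [("new", nw), ("old", old)]
      else [("shared", [pvGet (a.getLast?.getD []) key])]
    -- dict comprehension {key: entry(key) for key in a[0]}
    ((PySem.Dict.mk (a.headD [])).keys.foldl
      (fun (dd : PySem.Dict String (List (String × List String))) key => dd.insert key (entry key))
      PySem.Dict.empty).items

-- ===== PRECONDITION & SPEC =====
-- Pre_ excludes inputs on which some record of a or b lacks a key of a[0] (with both lists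
-- nonempty): there Python's m.get(key) is None, and A's returned dict contains None, which is
-- not a value of the declared type dict[str, dict[str, list[str]]].
def Pre_get_ds_diffs (a : List (List (String × String))) (b : List (List (String × String))) : Prop :=
  a = [] ∨ b = [] ∨
    ∀ k ∈ (a.headD []).map Prod.fst,
      (∀ m ∈ a, k ∈ m.map Prod.fst) ∧ (∀ m ∈ b, k ∈ m.map Prod.fst)
instance (a : List (List (String × String))) (b : List (List (String × String))) : Decidable (Pre_get_ds_diffs a b) := by unfold Pre_get_ds_diffs; infer_instance

def pvWitness_get_ds_diffs : (List (List (String × String))) × (List (List (String × String))) :=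
  ([[("k", "1")]], [[("k", "2")]])

def Spec_get_ds_diffs (a : List (List (String × String))) (b : List (List (String × String))) (out : List (String × List (String × List String))) : Prop := out = get_ds_diffs_alt a b
instance (a : List (List (String × String))) (b : List (List (String × String))) (out : List (String × List (String × List String))) : Decidable (Spec_get_ds_diffs a b out) := by unfold Spec_get_ds_diffs; infer_instance

-- ===== CLAIM (what is proved, stated in full; the proofs are below) =====
def Claim_equal_get_ds_diffs : Prop := ∀ (a : List (List (String × String))) (b : List (List (String × String))), Dom_get_ds_diffs a b → Pre_get_ds_diffs a b → Spec_get_ds_diffs a b (get_ds_diffs a b)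

-- ===== LEMMAS AND PROOFS =====

-- first-occurrence dedup as a structural recursion (proof-only reference form)
def pvDedupF : List String → List String
  | [] => []
  | v :: t => v :: (pvDedupF t).filter (fun x => x != v)

-- pvDedupF commutes with filter
theorem pvDedupF_filter (p : String → Bool) (l : List String) :
    pvDedupF (l.filter p) = (pvDedupF l).filter p := by
  induction l with
  | nil => rfl
  | cons x t ih =>
    by_cases hp : p x = true
    · simp only [List.filter_cons, hp, if_pos, pvDedupF, ih, List.filter_filter]
      congr 1
      apply List.filter_congr
      intro y _
      simp [Bool.and_comm]
    · simp only [List.filter_cons, hp, pvDedupF]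
      simp only [Bool.false_eq_true, if_false, List.filter_filter]
      rw [ih]
      apply List.filter_congr
      intro y _
      by_cases hpy : p y = true
      · have hyx : (y != x) = true := by
          simp only [bne_iff_ne]
          intro h; rw [h] at hpy; exact hp hpy
        simp [hpy, hyx]
      · simp [hpy]

-- A's membership-scan fold, with accumulator, in terms of pvDedupF
theorem pv_foldl_mem_dedup (xs : List String) (acc : List String) :
    xs.foldl (fun nl v => if v ∈ nl then nl else nl ++ [v]) acc =
      acc ++ pvDedupF (xs.filter (fun v => !(acc.contains v))) := by
  induction xs generalizing acc with
  | nil => simp [pvDedupF]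
  | cons v t ih =>
    simp only [List.foldl_cons]
    by_cases hv : v ∈ acc
    · rw [if_pos hv, ih]
      have : (v :: t).filter (fun v => !(acc.contains v)) = t.filter (fun v => !(acc.contains v)) := by
        simp [hv]
      rw [← this]
    · rw [if_neg hv, ih]
      have hcons : (v :: t).filter (fun v => !(acc.contains v)) =
          v :: t.filter (fun v => !(acc.contains v)) := by
        simp [hv]
      rw [hcons]
      simp only [pvDedupF, List.append_assoc, List.cons_append, List.nil_append]
      congr 2
      have hsplit : t.filter (fun w => !((acc ++ [v]).contains w)) =
          (t.filter (fun w => !(acc.contains w))).filter (fun w => w != v) := by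
        rw [List.filter_filter]
        apply List.filter_congr
        intro y _
        by_cases hy : y = v <;> by_cases hya : y ∈ acc <;>
          simp [hy, hya, List.contains_eq_mem]
      rw [hsplit, pvDedupF_filter]

-- B's back-to-front pass equals the structural recursion
theorem pvDedup_eq (xs : List String) : pvDedup xs = pvDedupF xs := by
  unfold pvDedup
  rw [List.foldl_reverse]
  induction xs with
  | nil => rfl
  | cons v t ih => simp [List.foldr_cons, ih, pvDedupF]

-- per-key: A's scan over the records equals B's column-then-dedup
theorem pv_key_column (records : List (List (String × String))) (k : String) :
    records.foldl (fun nl m => if pvGet m k ∈ nl then nl else nl ++ [pvGet m k]) [] =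
      pvDedup (records.map (fun m => pvGet m k)) := by
  rw [pvDedup_eq]
  have h := pv_foldl_mem_dedup (records.map (fun m => pvGet m k)) []
  simp only [List.foldl_map] at h
  simpa using h

-- ===== VERDICT (by name: the statement is the Claim_ definition above) =====
theorem get_ds_diffs_spec : Claim_equal_get_ds_diffs := by
  intro a b _ _
  unfold Spec_get_ds_diffs get_ds_diffs get_ds_diffs_alt
  by_cases hg : a.length < 1 ∨ b.length < 1
  · rw [if_pos hg, if_pos hg]
  · rw [if_neg hg, if_neg hg]
    apply congrArg
    refine PySem.List.foldl_congr_mem _ _ _ _ (fun dd k _ => ?_)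
    simp only [pv_key_column]
    split_ifs <;> rfl
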